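-- pv_equiv track=rewrite | github.com/FFFSanchez/this-has-answers | api/views.py | replace_varies
-- ===== SOURCE A (Python) =====
-- def replace_varies(expression, varies):
--     """ Подставляем переменные """
--     exp = list(expression)
--
--     for var in varies:
--         for i, symb in enumerate(exp):
--             if symb == var:
--                 if i == 0:
--                     if not exp[i+1].isalpha():
--                         exp[i] = str(varies[var])
--                 elif 0 < i < len(exp)-1:
--                     if not exp[i+1].isalpha() and not exp[i-1].isalpha():
--                         exp[i] = str(varies[var])
--                 else:
--                     if not exp[i-1].isalpha():
--                         exp[i] = str(varies[var])
--     expression = ''.join(exp)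
--     return expression
-- ===== SOURCE B (Python) =====
-- def replace_varies(expression, varies):
--     """ Подставляем переменные """
--     values = {k: str(v) for k, v in varies.items() if len(k) == 1}
--
--     def blocked(j):
--         return 0 <= j < len(expression) and expression[j].isalpha()
--
--     return ''.join(
--         values[c] if c in values and not blocked(i - 1) and not blocked(i + 1) else c
--         for i, c in enumerate(expression)
--     )
-- ===== Notes on version B (the rewrite author's own statement) =====
-- stated objective: faster
-- what changed: A rescans and mutates the whole character list once per variable; B builds the value table once and makes a single pass over the string, substituting a character iff it is a variable whose neighbours in the original string are not alphabetic. …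
-- outside the precondition, e.g. on replace_varies('a5', {'a': 1, '5': 9}): A returns '19', B returns '15'; on replace_varies('a+b', {'a': 5, '5': 9}): A returns '9+b', B returns '5+b'
import Mathlib
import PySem

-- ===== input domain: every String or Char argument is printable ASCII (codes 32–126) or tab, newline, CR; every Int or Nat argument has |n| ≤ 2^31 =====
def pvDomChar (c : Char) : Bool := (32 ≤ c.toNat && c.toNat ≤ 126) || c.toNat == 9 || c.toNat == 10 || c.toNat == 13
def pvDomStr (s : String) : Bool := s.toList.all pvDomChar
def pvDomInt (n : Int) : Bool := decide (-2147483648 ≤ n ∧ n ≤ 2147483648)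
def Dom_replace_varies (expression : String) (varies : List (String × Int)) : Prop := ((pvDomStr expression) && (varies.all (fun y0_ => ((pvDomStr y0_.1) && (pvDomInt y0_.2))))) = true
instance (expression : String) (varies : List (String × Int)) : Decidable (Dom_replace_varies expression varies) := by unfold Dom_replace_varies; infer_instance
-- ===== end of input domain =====

-- B replaces A's per-variable rescans of a mutable character list by one table built
-- from varies and a single pass over the string (objective: asymptotically faster).

-- ===== PORT A =====
-- the branch structure of A's neighbour test (i == 0 / middle / last position);
-- Python reads exp[i+1] and raises IndexError when i = 0 = len(exp)-1 — that input is
-- excluded by Pre_ below, the total default [] here is never taken on admitted inputs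
def pvCondA (e : List (List Char)) (i : Nat) : Bool :=
  if i = 0 then
    !PySem.Chars.strIsalpha (e.getD (i+1) [])
  else if i < e.length - 1 then
    !PySem.Chars.strIsalpha (e.getD (i+1) []) && !PySem.Chars.strIsalpha (e.getD (i-1) [])
  else
    !PySem.Chars.strIsalpha (e.getD (i-1) [])

-- 'for i, symb in enumerate(exp)' over the list A mutates in place (length never changes)
def pvInnerA (k rep : List Char) (exp : List (List Char)) : List (List Char) :=
  (List.range exp.length).foldl
    (fun e i => if e.getD i [] == k then (if pvCondA e i then e.set i rep else e) else e) exp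

def replace_varies (expression : String) (varies : List (String × Int)) : String :=
  -- exp = list(expression)
  let exp0 : List (List Char) := expression.toList.map (fun c => [c])
  -- for var in varies: …  — dict iteration pairs each key once with its value, so
  -- str(varies[var]) is str(p.2) of the pair (Pre_ keeps the association list key-distinct)
  let exp := varies.foldl (fun e p => pvInnerA p.1.toList (PySem.Int.toChars p.2) e) exp0
  String.ofList exp.flatten  -- ''.join(exp)

-- ===== PORT B =====
-- values = {k: str(v) for k, v in varies.items() if len(k) == 1}
def pvValuesB (varies : List (String × Int)) : PySem.Dict (List Char) (List Char) :=
  varies.foldl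
    (fun d p => if p.1.toList.length = 1 then d.insert p.1.toList (PySem.Int.toChars p.2) else d)
    PySem.Dict.empty

-- blocked(j) = 0 <= j < len(expression) and expression[j].isalpha()
def pvBlockedB (s : List Char) (j : Int) : Bool :=
  decide (0 ≤ j) && decide (j < (s.length : Int)) && PySem.Chars.isalpha (PySem.List.pyGetD s j ' ')

def replace_varies_alt (expression : String) (varies : List (String × Int)) : String :=
  let s := expression.toList
  let values := pvValuesB varies
  -- ''.join(values[c] if c in values and not blocked(i-1) and not blocked(i+1) else c
  --         for i, c in enumerate(expression))
  String.ofList ((PySem.List.enumerate s 0).map (fun q =>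
    match values.get? [q.2] with
    | some v => if !pvBlockedB s (q.1 - 1) && !pvBlockedB s (q.1 + 1) then v else [q.2]
    | none => [q.2])).flatten

-- ===== PRECONDITION & SPEC =====
def pvNoCasc : List (String × Int) → Bool
  | [] => true
  | p :: rest => rest.all (fun q => !(q.1 == PySem.Int.toStr p.2)) && pvNoCasc rest

def pvIsKey (varies : List (String × Int)) (c : Char) : Bool :=
  varies.any (fun p => p.1.toList == [c])

def pvAdjOK (s : List Char) (varies : List (String × Int)) : Bool :=
  (List.range s.length).all (fun i =>
    !(decide (i + 1 < s.length) && pvIsKey varies (s.getD i ' ') && pvIsKey varies (s.getD (i+1) ' ')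
      && (PySem.Chars.isalpha (s.getD i ' ') != PySem.Chars.isalpha (s.getD (i+1) ' '))))

-- Pre_ excludes: (1) duplicate-key association lists (they do not represent a Python dict,
-- whose keys are unique); (2) varies in which a later variable name equals str(value) of an
-- earlier variable, where A re-substitutes its own output — a dict-iteration-order artefact;
-- (3) expressions in which a non-alphabetic variable character is adjacent to an alphabetic
-- variable character, where A's result depends on dict iteration order ('a5' with vars a, 5);
-- (4) one-character expressions equal to a variable name, on which A raises IndexError
-- while B returns the substituted value.
def Pre_replace_varies (expression : String) (varies : List (String × Int)) : Prop :=
  (varies.map Prod.fst).Nodup ∧ pvNoCasc varies = true ∧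
  pvAdjOK expression.toList varies = true ∧
  ¬(expression.toList.length = 1 ∧ varies.any (fun p => p.1 == expression) = true)

instance (expression : String) (varies : List (String × Int)) : Decidable (Pre_replace_varies expression varies) := by
  unfold Pre_replace_varies; infer_instance

def pvWitness_replace_varies : String × (List (String × Int)) := ("x+y*2", [("x", 3), ("y", 25)])

def Spec_replace_varies (expression : String) (varies : List (String × Int)) (out : String) : Prop := out = replace_varies_alt expression varies
instance (expression : String) (varies : List (String × Int)) (out : String) : Decidable (Spec_replace_varies expression varies out) := by unfold Spec_replace_varies; infer_instance

-- ===== CLAIM (what is proved, stated in full; the proofs are below) =====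
def Claim_equal_replace_varies : Prop := ∀ (expression : String) (varies : List (String × Int)), Dom_replace_varies expression varies → Pre_replace_varies expression varies → Spec_replace_varies expression varies (replace_varies expression varies)

-- ===== LEMMAS AND PROOFS =====

-- ---- the common model: which positions end up substituted, and by what ----

-- the (pass index, str(value)) of the unique variable whose name is the single char c
def pvKIdx (varies : List (String × Int)) (c : Char) : Option (Int × List Char) :=
  ((PySem.List.enumerate varies 0).find? (fun q => q.2.1.toList == [c])).map
    (fun q => (q.1, PySem.Int.toChars q.2.2))

-- whether position j ends up substituted: its char is a variable and its original
-- neighbours are not alphabetic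
def pvRepB (s : List Char) (varies : List (String × Int)) (j : Nat) : Bool :=
  (pvKIdx varies (s.getD j ' ')).isSome &&
  !pvBlockedB s ((j : Int) - 1) && !pvBlockedB s ((j : Int) + 1)

-- the cell at position j after A has run its first m passes and, within pass m, the
-- positions before i
def pvCellMix (s : List Char) (varies : List (String × Int)) (m : Int) (i : Nat) (j : Nat) : List Char :=
  match pvKIdx varies (s.getD j ' ') with
  | some q =>
      if pvRepB s varies j && (decide (q.1 < m) || (decide (q.1 = m) && decide (j < i)))
      then q.2 else [s.getD j ' ']
  | none => [s.getD j ' ']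

def pvMixed (s : List Char) (varies : List (String × Int)) (m : Int) (i : Nat) : List (List Char) :=
  (List.range s.length).map (pvCellMix s varies m i)

-- ---- small facts ----

theorem pv_getD_map_range (g : Nat → List Char) (n j : Nat) :
    ((List.range n).map g).getD j [] = if j < n then g j else [] := by
  by_cases h : j < n
  · rw [if_pos h]
    rw [List.getD_eq_getElem?_getD, List.getElem?_map]
    simp [h]
  · rw [if_neg h]
    rw [List.getD_eq_getElem?_getD]
    rw [List.getElem?_eq_none (by simpa using h)]
    rfl

theorem pv_digitsCore_not_alpha (fuel n : Nat) (acc : List Char)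
    (h : ∀ c ∈ acc, PySem.Chars.isalpha c = false) :
    ∀ c ∈ Nat.toDigitsCore 10 fuel n acc, PySem.Chars.isalpha c = false := by
  induction fuel generalizing n acc with
  | zero => simpa [Nat.toDigitsCore] using h
  | succ f ih =>
    have hd : PySem.Chars.isalpha ((n % 10).digitChar) = false := by
      have h10 : n % 10 < 10 := Nat.mod_lt _ (by norm_num)
      set d := n % 10 with hdd
      interval_cases d <;> decide
    simp only [Nat.toDigitsCore]
    by_cases hz : n / 10 = 0
    · rw [if_pos hz]
      intro c hc
      rcases List.mem_cons.mp hc with rfl | hc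
      · exact hd
      · exact h c hc
    · rw [if_neg hz]
      exact ih (n / 10) _ (by
        intro c hc
        rcases List.mem_cons.mp hc with rfl | hc
        · exact hd
        · exact h c hc)

theorem pv_toChars_not_alpha (v : Int) : PySem.Chars.strIsalpha (PySem.Int.toChars v) = false := by
  unfold PySem.Int.toChars
  by_cases hv : v < 0
  · rw [if_pos hv]
    have h2 : PySem.Chars.isalpha '-' = false := by decide
    simp [PySem.Chars.strIsalpha, h2]
  · rw [if_neg hv]
    have hall := pv_digitsCore_not_alpha (v.toNat + 1) v.toNat [] (by simp)
    rw [show Nat.toDigits 10 v.toNat = Nat.toDigitsCore 10 (v.toNat + 1) v.toNat [] from rfl]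
    cases hl : Nat.toDigitsCore 10 (v.toNat + 1) v.toNat [] with
    | nil => simp [PySem.Chars.strIsalpha]
    | cons a l' =>
      have ha := hall a (by rw [hl]; exact List.mem_cons_self)
      simp [PySem.Chars.strIsalpha, ha]

theorem pv_strIsalpha_single (c : Char) : PySem.Chars.strIsalpha [c] = PySem.Chars.isalpha c := by
  simp [PySem.Chars.strIsalpha]

-- B's table lookup = first (unique) matching pair
theorem pv_values_nomatch (c : Char) (l : List (String × Int))
    (d : PySem.Dict (List Char) (List Char)) (h : ∀ p ∈ l, p.1.toList ≠ [c]) :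
    (l.foldl
      (fun d p => if p.1.toList.length = 1 then d.insert p.1.toList (PySem.Int.toChars p.2) else d)
      d).get? [c] = d.get? [c] := by
  induction l generalizing d with
  | nil => simp
  | cons p rest ih =>
    rw [List.foldl_cons]
    rw [ih _ (fun q hq => h q (List.mem_cons_of_mem _ hq))]
    by_cases hp : p.1.toList.length = 1
    · rw [if_pos hp]
      exact PySem.Dict.get?_insert_of_ne _ _ (Ne.symm (h p List.mem_cons_self))
    · rw [if_neg hp]

theorem pv_values_get_aux (c : Char) (l : List (String × Int)) (sι : Int)
    (d : PySem.Dict (List Char) (List Char)) (hnd : (l.map Prod.fst).Nodup) :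
    (l.foldl
      (fun d p => if p.1.toList.length = 1 then d.insert p.1.toList (PySem.Int.toChars p.2) else d)
      d).get? [c] =
    match (PySem.List.enumerate l sι).find? (fun q => q.2.1.toList == [c]) with
    | some q => some (PySem.Int.toChars q.2.2)
    | none => d.get? [c] := by
  induction l generalizing sι d with
  | nil => simp [PySem.List.enumerate_nil]
  | cons p rest ih =>
    have hnd' : p.1 ∉ rest.map Prod.fst ∧ (rest.map Prod.fst).Nodup := by
      rw [List.map_cons] at hnd
      exact List.nodup_cons.mp hnd
    rw [PySem.List.enumerate_cons, List.foldl_cons, List.find?_cons]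
    by_cases hp : p.1.toList = [c]
    · have hlen : p.1.toList.length = 1 := by rw [hp]; rfl
      have hpred : (((sι : Int), p).2.1.toList == [c]) = true := by simpa using hp
      rw [hpred, if_pos hlen]
      have hnomatch : ∀ q ∈ rest, q.1.toList ≠ [c] := by
        intro q hq hqc
        have hqp : q.1 = p.1 := String.toList_inj.mp (by rw [hqc, hp])
        exact hnd'.1 (hqp ▸ List.mem_map_of_mem hq)
      rw [pv_values_nomatch c rest _ hnomatch, hp, PySem.Dict.get?_insert_self]
    · have hpred : (((sι : Int), p).2.1.toList == [c]) = false := by simpa using hp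
      rw [hpred]
      rw [ih (sι+1) _ hnd'.2]
      cases hf : (PySem.List.enumerate rest (sι+1)).find? (fun q => q.2.1.toList == [c]) with
      | some q => rfl
      | none =>
        by_cases hl : p.1.toList.length = 1
        · rw [if_pos hl]
          exact PySem.Dict.get?_insert_of_ne _ _ (fun hh => hp hh.symm)
        · rw [if_neg hl]

theorem pv_values_get (varies : List (String × Int)) (hnd : (varies.map Prod.fst).Nodup) (c : Char) :
    (pvValuesB varies).get? [c] = (pvKIdx varies c).map Prod.snd := by
  unfold pvValuesB pvKIdx
  rw [pv_values_get_aux c varies 0 _ hnd]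
  cases hf : (PySem.List.enumerate varies 0).find? (fun q => q.2.1.toList == [c]) with
  | some q => simp
  | none => simp [PySem.Dict.get?_empty]

-- what a pvKIdx hit means
theorem pv_kidx_some (varies : List (String × Int)) (c : Char) (hit : Int × List Char)
    (h : pvKIdx varies c = some hit) :
    ∃ (t : Nat) (ht : t < varies.length), hit.1 = (t : Int) ∧
      varies[t].1.toList = [c] ∧ hit.2 = PySem.Int.toChars varies[t].2 := by
  unfold pvKIdx at h
  cases hf : (PySem.List.enumerate varies 0).find? (fun q => q.2.1.toList == [c]) with
  | none => rw [hf] at h; simp at h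
  | some q =>
    rw [hf] at h
    simp only [Option.map_some] at h
    have hmem := List.mem_of_find?_eq_some hf
    have hpred := List.find?_some hf
    rw [PySem.List.mem_enumerate_iff] at hmem
    obtain ⟨k, hk, rfl⟩ := hmem
    obtain rfl := Option.some.inj h
    refine ⟨k, hk, by simp, by simpa using hpred, by simp⟩

theorem pv_kidx_first (varies : List (String × Int)) (hnd : (varies.map Prod.fst).Nodup)
    (m : Nat) (hm : m < varies.length) (c : Char) (hc : varies[m].1.toList = [c]) :
    pvKIdx varies c = some ((m : Int), PySem.Int.toChars varies[m].2) := by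
  have hex : ∃ x ∈ PySem.List.enumerate varies 0, (fun (q : Int × (String × Int)) => q.2.1.toList == [c]) x = true :=
    ⟨((0 : Int) + m, varies[m]), (PySem.List.mem_enumerate_iff _ _ _).mpr ⟨m, hm, rfl⟩, by simpa using hc⟩
  have hs : ((PySem.List.enumerate varies 0).find? (fun q => q.2.1.toList == [c])).isSome :=
    List.find?_isSome.mpr hex
  obtain ⟨q, hf⟩ := Option.isSome_iff_exists.mp hs
  have hmem := List.mem_of_find?_eq_some hf
  have hpred := List.find?_some hf
  rw [PySem.List.mem_enumerate_iff] at hmem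
  obtain ⟨k, hk, rfl⟩ := hmem
  have hkc : varies[k].1.toList = [c] := by simpa using hpred
  have hkm : k = m := by
    have h1 : varies[k].1 = varies[m].1 := String.toList_inj.mp (by rw [hkc, hc])
    have h2 : (varies.map Prod.fst)[k]'(by simpa using hk) = (varies.map Prod.fst)[m]'(by simpa using hm) := by
      simpa using h1
    exact hnd.getElem_inj_iff.mp h2
  subst hkm
  unfold pvKIdx
  rw [hf]
  simp

theorem pv_key_iff (varies : List (String × Int)) (c : Char) :
    (pvKIdx varies c).isSome = pvIsKey varies c := by
  unfold pvKIdx pvIsKey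
  rw [Option.isSome_map]
  rcases hb : varies.any (fun p => p.1.toList == [c]) with _ | _
  · rw [Option.isSome_eq_false_iff, Option.isNone_iff_eq_none, List.find?_eq_none]
    intro q hq
    rw [PySem.List.mem_enumerate_iff] at hq
    obtain ⟨k, hk, rfl⟩ := hq
    have := (List.any_eq_false.mp hb) varies[k] (List.getElem_mem hk)
    simpa using this
  · obtain ⟨p, hp, hpp⟩ := List.any_eq_true.mp hb
    obtain ⟨k, hk, rfl⟩ := List.getElem_of_mem hp
    exact List.find?_isSome.mpr
      ⟨((0 : Int) + k, varies[k]), (PySem.List.mem_enumerate_iff _ _ _).mpr ⟨k, hk, rfl⟩, by simpa using hpp⟩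

theorem pv_nocasc (varies : List (String × Int)) (h : pvNoCasc varies = true)
    (t m : Nat) (htm : t < m) (hm : m < varies.length) :
    varies[m].1 ≠ PySem.Int.toStr (varies[t]'(Nat.lt_trans htm hm)).2 := by
  induction varies generalizing t m with
  | nil => exact absurd hm (by simp)
  | cons p rest ih =>
    cases m with
    | zero => omega
    | succ m' =>
      have hm' : m' < rest.length := by simpa using hm
      have hh : rest.all (fun q => !(q.1 == PySem.Int.toStr p.2)) = true ∧ pvNoCasc rest = true := by
        have := h
        rw [show pvNoCasc (p :: rest) = (rest.all (fun q => !(q.1 == PySem.Int.toStr p.2)) && pvNoCasc rest) from rfl] at this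
        exact (Bool.and_eq_true _ _).mp this
      cases t with
      | zero =>
        have hmem : rest[m'] ∈ rest := List.getElem_mem _
        have hr := (List.all_eq_true.mp hh.1) _ hmem
        simp only [Bool.not_eq_true', beq_eq_false_iff_ne, ne_eq] at hr
        simpa [List.getElem_cons_succ] using hr
      | succ t' =>
        have := ih hh.2 t' m' (by omega) hm'
        simpa [List.getElem_cons_succ] using this

theorem pv_getD_char (s : List Char) (j : Nat) (h : j < s.length) : s.getD j ' ' = s[j] := by
  rw [List.getD_eq_getElem?_getD, List.getElem?_eq_getElem h]
  rfl

-- adjacent variable characters have the same alphabeticity (Pre_'s condition (3))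
theorem pv_adj (s : List Char) (varies : List (String × Int)) (hadj : pvAdjOK s varies = true)
    (i : Nat) (hi : i + 1 < s.length)
    (h1 : pvIsKey varies (s.getD i ' ') = true) (h2 : pvIsKey varies (s.getD (i+1) ' ') = true) :
    PySem.Chars.isalpha (s.getD i ' ') = PySem.Chars.isalpha (s.getD (i+1) ' ') := by
  have hmem : i ∈ List.range s.length := List.mem_range.mpr (by omega)
  have h := (List.all_eq_true.mp hadj) i hmem
  rw [decide_eq_true hi, h1, h2] at h
  simp only [Bool.true_and, Bool.not_eq_true'] at h
  simpa [bne_eq_false_iff_eq] using h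

-- an original neighbour of a variable position keeps its alphabeticity in every mixed state
theorem pv_cell_alpha_eq (s : List Char) (varies : List (String × Int))
    (hadj : pvAdjOK s varies = true) (m : Int) (i' : Nat) (i j : Nat)
    (hi : i < s.length) (hj : j < s.length) (hijadj : i = j + 1 ∨ j = i + 1)
    (hkey : pvIsKey varies (s.getD i ' ') = true) :
    PySem.Chars.strIsalpha (pvCellMix s varies m i' j) = PySem.Chars.isalpha (s.getD j ' ') := by
  cases hg : pvKIdx varies (s.getD j ' ') with
  | none =>
    have hcell : pvCellMix s varies m i' j = [s.getD j ' '] := by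
      unfold pvCellMix; rw [hg]
    rw [hcell, pv_strIsalpha_single]
  | some q =>
    by_cases hflag : (pvRepB s varies j && (decide (q.1 < m) || (decide (q.1 = m) && decide (j < i')))) = true
    · -- substituted: s[j] cannot be alphabetic, and str(value) is never alphabetic
      obtain ⟨t, ht, h1, h2, h3⟩ := pv_kidx_some varies _ q hg
      have hrep : pvRepB s varies j = true := (Bool.and_eq_true _ _ |>.mp hflag).1
      have hkj : pvIsKey varies (s.getD j ' ') = true := by
        rw [← pv_key_iff, hg]; rfl
      have hja : PySem.Chars.isalpha (s.getD j ' ') = false := by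
        by_contra hcf
        rw [Bool.not_eq_false] at hcf
        have hia : PySem.Chars.isalpha (s.getD i ' ') = true := by
          rcases hijadj with hh | hh
          · subst hh
            rw [← pv_adj s varies hadj j hi hkj hkey]
            exact hcf
          · subst hh
            rw [pv_adj s varies hadj i hj hkey hkj]
            exact hcf
        have hbl : pvBlockedB s ((i : Nat) : Int) = true := by
          unfold pvBlockedB
          rw [PySem.List.pyGetD_natCast]
          simp only [decide_eq_true (show (0:Int) ≤ ((i:Nat):Int) by omega),
            decide_eq_true (show ((i:Nat):Int) < (s.length:Int) by exact_mod_cast hi), Bool.true_and]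
          exact hia
        unfold pvRepB at hrep
        rcases hijadj with hh | hh
        · have he : ((j:Nat):Int) + 1 = ((i:Nat):Int) := by rw [hh]; push_cast; ring
          rw [he, hbl] at hrep
          simp at hrep
        · have he : ((j:Nat):Int) - 1 = ((i:Nat):Int) := by rw [hh]; push_cast; ring
          rw [he, hbl] at hrep
          simp at hrep
      have hcell : pvCellMix s varies m i' j = q.2 := by
        unfold pvCellMix; rw [hg]
        exact if_pos hflag
      rw [hcell, h3, pv_toChars_not_alpha, hja]
    · have hcell : pvCellMix s varies m i' j = [s.getD j ' '] := by
        unfold pvCellMix; rw [hg]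
        exact if_neg hflag
      rw [hcell, pv_strIsalpha_single]

-- A's neighbour test at a variable position, in any mixed state, equals B's test on the
-- original string
theorem pv_condA (s : List Char) (varies : List (String × Int))
    (hadj : pvAdjOK s varies = true)
    (hsafe : ¬(s.length = 1 ∧ pvIsKey varies (s.getD 0 ' ') = true))
    (m : Int) (i' : Nat) (i : Nat) (hi : i < s.length)
    (hkey : pvIsKey varies (s.getD i ' ') = true) :
    pvCondA (pvMixed s varies m i') i =
      (!pvBlockedB s ((i : Int) - 1) && !pvBlockedB s ((i : Int) + 1)) := by
  have hlen : (pvMixed s varies m i').length = s.length := by unfold pvMixed; simp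
  unfold pvCondA
  rw [hlen]
  by_cases h0 : i = 0
  · subst h0
    have hn2 : 1 < s.length := by
      rcases Nat.lt_or_ge 1 s.length with h | h
      · exact h
      · exact absurd ⟨by omega, hkey⟩ hsafe
    rw [if_pos rfl]
    have hg : (pvMixed s varies m i').getD 1 [] = pvCellMix s varies m i' 1 := by
      unfold pvMixed; rw [pv_getD_map_range, if_pos hn2]
    rw [hg, pv_cell_alpha_eq s varies hadj m i' 0 1 (by omega) hn2 (Or.inr rfl) hkey]
    have hbm : pvBlockedB s (((0:Nat):Int) - 1) = false := by
      unfold pvBlockedB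
      rw [decide_eq_false (show ¬((0:Int) ≤ ((0:Nat):Int) - 1) by omega)]
      simp
    have hbp : pvBlockedB s (((0:Nat):Int) + 1) = PySem.Chars.isalpha (s.getD 1 ' ') := by
      unfold pvBlockedB
      rw [show (((0:Nat):Int) + 1) = ((1:Nat):Int) by omega, PySem.List.pyGetD_natCast]
      simp only [decide_eq_true (show (0:Int) ≤ ((1:Nat):Int) by omega),
        decide_eq_true (show ((1:Nat):Int) < (s.length:Int) by exact_mod_cast hn2), Bool.true_and]
    rw [hbm, hbp]
    simp
  · have hi1 : i - 1 < s.length := by omega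
    have hgm : (pvMixed s varies m i').getD (i-1) [] = pvCellMix s varies m i' (i-1) := by
      unfold pvMixed; rw [pv_getD_map_range, if_pos hi1]
    have hcm : PySem.Chars.strIsalpha ((pvMixed s varies m i').getD (i-1) []) = PySem.Chars.isalpha (s.getD (i-1) ' ') := by
      rw [hgm]
      exact pv_cell_alpha_eq s varies hadj m i' i (i-1) hi hi1 (Or.inl (by omega)) hkey
    have hbm : pvBlockedB s ((i:Int) - 1) = PySem.Chars.isalpha (s.getD (i-1) ' ') := by
      unfold pvBlockedB
      rw [show ((i:Int) - 1) = (((i-1 : Nat)):Int) by omega, PySem.List.pyGetD_natCast]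
      simp only [decide_eq_true (show (0:Int) ≤ (((i-1:Nat)):Int) by omega),
        decide_eq_true (show (((i-1:Nat)):Int) < (s.length:Int) by exact_mod_cast hi1), Bool.true_and]
    by_cases hlast : i < s.length - 1
    · rw [if_neg h0, if_pos hlast]
      have hip : i + 1 < s.length := by omega
      have hgp : (pvMixed s varies m i').getD (i+1) [] = pvCellMix s varies m i' (i+1) := by
        unfold pvMixed; rw [pv_getD_map_range, if_pos hip]
      have hcp : PySem.Chars.strIsalpha ((pvMixed s varies m i').getD (i+1) []) = PySem.Chars.isalpha (s.getD (i+1) ' ') := by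
        rw [hgp]
        exact pv_cell_alpha_eq s varies hadj m i' i (i+1) hi hip (Or.inr rfl) hkey
      have hbp : pvBlockedB s ((i:Int) + 1) = PySem.Chars.isalpha (s.getD (i+1) ' ') := by
        unfold pvBlockedB
        rw [show ((i:Int) + 1) = (((i+1 : Nat)):Int) by omega, PySem.List.pyGetD_natCast]
        simp only [decide_eq_true (show (0:Int) ≤ (((i+1:Nat)):Int) by omega),
          decide_eq_true (show (((i+1:Nat)):Int) < (s.length:Int) by exact_mod_cast hip), Bool.true_and]
      rw [hcp, hcm, hbm, hbp]
      rw [Bool.and_comm]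
    · rw [if_neg h0, if_neg hlast]
      have hbp : pvBlockedB s ((i:Int) + 1) = false := by
        unfold pvBlockedB
        have : decide ((i:Int) + 1 < (s.length:Int)) = false := decide_eq_false (by omega)
        rw [this]
        simp
      rw [hcm, hbm, hbp]
      simp

-- only the cell at position i distinguishes the mixed state 'pass m, position i' from
-- 'pass m, position i+1'
theorem pv_cellMix_succ_ne (s : List Char) (varies : List (String × Int)) (m : Int)
    (i j : Nat) (hji : j ≠ i) :
    pvCellMix s varies m (i+1) j = pvCellMix s varies m i j := by
  unfold pvCellMix
  cases hg : pvKIdx varies (s.getD j ' ') with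
  | none => rfl
  | some q =>
    have : decide (j < i + 1) = decide (j < i) := decide_eq_decide.mpr (by omega)
    rw [this]

theorem pv_mixed_succ (s : List Char) (varies : List (String × Int)) (m : Int) (i : Nat)
    (h : pvCellMix s varies m (i+1) i = pvCellMix s varies m i i) :
    pvMixed s varies m i = pvMixed s varies m (i+1) := by
  unfold pvMixed
  apply List.map_congr_left
  intro j hj
  by_cases hji : j = i
  · subst hji; exact h.symm
  · exact (pv_cellMix_succ_ne s varies m i j hji).symm

-- ---- the per-position step of one of A's passes ----

theorem pv_step (s : List Char) (varies : List (String × Int))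
    (hnd : (varies.map Prod.fst).Nodup) (hnc : pvNoCasc varies = true)
    (hadj : pvAdjOK s varies = true)
    (hsafe : ¬(s.length = 1 ∧ pvIsKey varies (s.getD 0 ' ') = true))
    (m : Nat) (hm : m < varies.length) (i : Nat) (hi : i < s.length) :
    (fun (e : List (List Char)) (i : Nat) =>
        if e.getD i [] == varies[m].1.toList then
          (if pvCondA e i then e.set i (PySem.Int.toChars varies[m].2) else e) else e)
      (pvMixed s varies (m : Int) i) i = pvMixed s varies (m : Int) (i+1) := by
  show (if (pvMixed s varies (m:Int) i).getD i [] == varies[m].1.toList then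
          (if pvCondA (pvMixed s varies (m:Int) i) i then
             (pvMixed s varies (m:Int) i).set i (PySem.Int.toChars varies[m].2)
           else pvMixed s varies (m:Int) i)
        else pvMixed s varies (m:Int) i) = pvMixed s varies (m:Int) (i+1)
  have hcell : (pvMixed s varies (m:Int) i).getD i [] = pvCellMix s varies (m:Int) i i := by
    unfold pvMixed; rw [pv_getD_map_range, if_pos hi]
  rw [hcell]
  cases hkc : pvKIdx varies (s.getD i ' ') with
  | none =>
    have hc : pvCellMix s varies (m:Int) i i = [s.getD i ' '] := by
      unfold pvCellMix; rw [hkc]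
    have hne : varies[m].1.toList ≠ [s.getD i ' '] := by
      intro hkey
      rw [pv_kidx_first varies hnd m hm _ hkey] at hkc
      cases hkc
    have hbeq : ([s.getD i ' '] == varies[m].1.toList) = false :=
      beq_eq_false_iff_ne.mpr (fun h => hne h.symm)
    rw [hc, hbeq, if_neg (by simp)]
    apply pv_mixed_succ
    unfold pvCellMix; rw [hkc]
  | some q =>
    obtain ⟨t, ht, hq1, hq2, hq3⟩ := pv_kidx_some varies _ q hkc
    by_cases hkey : varies[m].1.toList = [s.getD i ' ']
    · have hfirst := pv_kidx_first varies hnd m hm _ hkey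
      have hq : q = ((m : Int), PySem.Int.toChars varies[m].2) := by
        rw [hfirst] at hkc
        exact (Option.some.inj hkc).symm
      have hflagf : (pvRepB s varies i && (decide (q.1 < (m:Int)) || (decide (q.1 = (m:Int)) && decide (i < i)))) = false := by
        rw [hq]
        have hz : (decide (((m:Nat):Int) < (m:Nat)) || (decide (((m:Nat):Int) = ((m:Nat):Int)) && decide (i < i))) = false := by
          simp
        rw [show ((((m:Nat):Int), PySem.Int.toChars varies[m].2).1) = (((m:Nat)):Int) from rfl, hz, Bool.and_false]
      have hc : pvCellMix s varies (m:Int) i i = [s.getD i ' '] := by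
        unfold pvCellMix; rw [hkc]
        exact if_neg (by rw [hflagf]; exact Bool.false_ne_true)
      have hkeyb : pvIsKey varies (s.getD i ' ') = true := by
        rw [← pv_key_iff, hkc]; rfl
      rw [hc, show ([s.getD i ' '] == varies[m].1.toList) = true from beq_iff_eq.mpr hkey.symm, if_pos rfl]
      rw [pv_condA s varies hadj hsafe (m:Int) i i hi hkeyb]
      by_cases hnbc : (!pvBlockedB s ((i:Int) - 1) && !pvBlockedB s ((i:Int) + 1)) = true
      · rw [if_pos hnbc]
        have hrep : pvRepB s varies i = true := by
          unfold pvRepB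
          rw [hkc]
          rw [Bool.and_assoc]
          rw [hnbc]
          rfl
        apply List.ext_getElem
        · unfold pvMixed; simp
        · intro j hja hjb
          have hjn : j < s.length := by
            have : (pvMixed s varies (m:Int) (i+1)).length = s.length := by unfold pvMixed; simp
            omega
          have hin : i < (pvMixed s varies (m:Int) i).length := by
            unfold pvMixed; simpa using hi
          by_cases hji : j = i
          · subst hji
            rw [List.getElem_set_self]
            unfold pvMixed
            rw [List.getElem_map]
            rw [List.getElem_range]
            unfold pvCellMix
            rw [hkc, hq]
            simp [hrep]
          · have hjl : j < (pvMixed s varies (m:Int) i).length := by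
              unfold pvMixed; simpa using hjn
            have hset : ((pvMixed s varies (m:Int) i).set i (PySem.Int.toChars varies[m].2))[j]'hja = (pvMixed s varies (m:Int) i)[j]'hjl :=
              List.getElem_set_ne (fun hh => hji hh.symm) hja
            rw [hset]
            unfold pvMixed
            rw [List.getElem_map, List.getElem_map]
            exact (pv_cellMix_succ_ne s varies (m:Int) i ((List.range s.length)[j]'(by simpa using hjn)) (by rw [List.getElem_range]; exact hji)).symm
      · rw [if_neg hnbc]
        apply pv_mixed_succ
        have hrep : pvRepB s varies i = false := by
          unfold pvRepB
          rw [hkc, Bool.and_assoc]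
          rw [Bool.eq_false_iff.mpr hnbc]
          simp
        unfold pvCellMix
        rw [hkc]
        simp [hrep]
    · have htm : q.1 ≠ (m : Int) := by
        rw [hq1]
        intro hh
        have htm' : t = m := by exact_mod_cast hh
        subst htm'
        exact hkey hq2
      have hdm : decide (q.1 = (m:Int)) = false := decide_eq_false htm
      by_cases hflag : (pvRepB s varies i && (decide (q.1 < (m:Int)) || (decide (q.1 = (m:Int)) && decide (i < i)))) = true
      · have hc : pvCellMix s varies (m:Int) i i = q.2 := by
          unfold pvCellMix; rw [hkc]
          exact if_pos hflag
        have htlt : q.1 < (m:Int) := by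
          have h2 := (Bool.and_eq_true _ _ |>.mp hflag).2
          rcases Bool.or_eq_true _ _ |>.mp h2 with h | h
          · exact of_decide_eq_true h
          · exfalso
            have := (Bool.and_eq_true _ _ |>.mp h).2
            simp at this
        have htm2 : t < m := by
          rw [hq1] at htlt
          exact_mod_cast htlt
        have hnocasc := pv_nocasc varies hnc t m htm2 hm
        have hbeq : (q.2 == varies[m].1.toList) = false := by
          rw [hq3]
          apply beq_eq_false_iff_ne.mpr
          intro hh
          apply hnocasc
          apply String.toList_inj.mp
          rw [PySem.Int.toList_toStr]
          exact hh.symm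
        rw [hc, hbeq, if_neg (by simp)]
        apply pv_mixed_succ
        unfold pvCellMix
        rw [hkc]
        simp [hdm]
      · have hc : pvCellMix s varies (m:Int) i i = [s.getD i ' '] := by
          unfold pvCellMix; rw [hkc]
          exact if_neg hflag
        have hbeq : ([s.getD i ' '] == varies[m].1.toList) = false :=
          beq_eq_false_iff_ne.mpr (fun h => hkey h.symm)
        rw [hc, hbeq, if_neg (by simp)]
        apply pv_mixed_succ
        unfold pvCellMix
        rw [hkc]
        simp [hdm]

theorem pv_pass (s : List Char) (varies : List (String × Int))
    (hnd : (varies.map Prod.fst).Nodup) (hnc : pvNoCasc varies = true)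
    (hadj : pvAdjOK s varies = true)
    (hsafe : ¬(s.length = 1 ∧ pvIsKey varies (s.getD 0 ' ') = true))
    (m : Nat) (hm : m < varies.length) :
    pvInnerA varies[m].1.toList (PySem.Int.toChars varies[m].2) (pvMixed s varies (m : Int) 0) =
      pvMixed s varies ((m : Int) + 1) 0 := by
  unfold pvInnerA
  have hlen : (pvMixed s varies (m:Int) 0).length = s.length := by unfold pvMixed; simp
  rw [hlen]
  have haux : ∀ i, i ≤ s.length →
      (List.range i).foldl
        (fun e i => if e.getD i [] == varies[m].1.toList then (if pvCondA e i then e.set i (PySem.Int.toChars varies[m].2) else e) else e)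
        (pvMixed s varies (m:Int) 0) = pvMixed s varies (m:Int) i := by
    intro i
    induction i with
    | zero => intro _; rfl
    | succ i' ih =>
      intro hle
      rw [List.range_succ, List.foldl_append, ih (by omega), List.foldl_cons, List.foldl_nil]
      exact pv_step s varies hnd hnc hadj hsafe m hm i' (by omega)
  rw [haux s.length le_rfl]
  unfold pvMixed
  apply List.map_congr_left
  intro j hj
  rw [List.mem_range] at hj
  unfold pvCellMix
  cases hg : pvKIdx varies (s.getD j ' ') with
  | none => rfl
  | some hit =>
    have e1 : (decide (hit.1 < (m:Int)) || (decide (hit.1 = (m:Int)) && decide (j < s.length))) = decide (hit.1 < (m:Int)+1) := by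
      by_cases h1 : hit.1 < (m:Int)
      · simp [h1, show hit.1 < (m:Int)+1 by omega]
      · by_cases h2 : hit.1 = (m:Int)
        · simp [h2, hj, show (m:Int) < (m:Int)+1 by omega]
        · simp [h1, h2, show ¬(hit.1 < (m:Int)+1) by omega]
    have e2 : (decide (hit.1 < (m:Int)+1) || (decide (hit.1 = (m:Int)+1) && decide (j < 0))) = decide (hit.1 < (m:Int)+1) := by
      rw [decide_eq_false (show ¬ (j < 0) by omega), Bool.and_false, Bool.or_false]
    simp only [e1, e2]

theorem pv_fold (s : List Char) (varies : List (String × Int))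
    (hnd : (varies.map Prod.fst).Nodup) (hnc : pvNoCasc varies = true)
    (hadj : pvAdjOK s varies = true)
    (hsafe : ¬(s.length = 1 ∧ pvIsKey varies (s.getD 0 ' ') = true)) :
    varies.foldl (fun e p => pvInnerA p.1.toList (PySem.Int.toChars p.2) e)
      (pvMixed s varies 0 0) = pvMixed s varies (varies.length : Int) 0 := by
  suffices haux : ∀ (l2 l1 : List (String × Int)), varies = l1 ++ l2 →
      l2.foldl (fun e p => pvInnerA p.1.toList (PySem.Int.toChars p.2) e) (pvMixed s varies ((l1.length : Nat) : Int) 0) = pvMixed s varies ((varies.length : Nat) : Int) 0 by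
    have h0 := haux varies [] (by simp)
    simpa using h0
  intro l2
  induction l2 with
  | nil =>
    intro l1 hsplit
    rw [List.foldl_nil]
    have : l1.length = varies.length := by rw [hsplit]; simp
    rw [this]
  | cons p l2' ih =>
    intro l1 hsplit
    rw [List.foldl_cons]
    have hm : l1.length < varies.length := by
      rw [hsplit]; simp only [List.length_append, List.length_cons]; omega
    have hp : varies[l1.length]'hm = p := by
      subst hsplit
      simp
    rw [← hp, pv_pass s varies hnd hnc hadj hsafe l1.length hm]
    have hc : ((l1.length : Int) + 1) = (((l1 ++ [p]).length : Nat) : Int) := by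
      simp
    rw [hc]
    exact ih (l1 ++ [p]) (by rw [hsplit]; simp)

theorem pv_init (s : List Char) (varies : List (String × Int)) :
    s.map (fun c => [c]) = pvMixed s varies 0 0 := by
  apply List.ext_getElem
  · unfold pvMixed; simp
  · intro j h1 h2
    have hj : j < s.length := by simpa using h1
    unfold pvMixed
    simp only [List.getElem_map, List.getElem_range]
    unfold pvCellMix
    rw [pv_getD_char s j hj]
    cases hg : pvKIdx varies s[j] with
    | none => rfl
    | some hit =>
      obtain ⟨t, ht, h1', h2', h3'⟩ := pv_kidx_some varies _ hit hg
      have e1 : decide (hit.1 < (0:Int)) = false := decide_eq_false (by rw [h1']; omega)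
      simp [e1]

theorem pv_final (s : List Char) (varies : List (String × Int))
    (hnd : (varies.map Prod.fst).Nodup) :
    (PySem.List.enumerate s 0).map (fun q =>
      match (pvValuesB varies).get? [q.2] with
      | some v => if !pvBlockedB s (q.1 - 1) && !pvBlockedB s (q.1 + 1) then v else [q.2]
      | none => [q.2]) = pvMixed s varies (varies.length : Int) 0 := by
  apply List.ext_getElem
  · unfold pvMixed; simp [PySem.List.length_enumerate]
  · intro j h1 h2
    have hj : j < s.length := by simpa [PySem.List.length_enumerate] using h1
    unfold pvMixed
    simp only [List.getElem_map, List.getElem_range]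
    rw [PySem.List.getElem_enumerate]
    simp only [zero_add]
    unfold pvCellMix
    rw [pv_getD_char s j hj, pv_values_get varies hnd]
    cases hg : pvKIdx varies s[j] with
    | none => rfl
    | some hit =>
      obtain ⟨t, ht, h1', h2', h3'⟩ := pv_kidx_some varies _ hit hg
      have hlt : decide (hit.1 < (varies.length : Int)) = true := decide_eq_true (by rw [h1']; exact_mod_cast ht)
      have hj0 : decide (j < 0) = false := decide_eq_false (by omega)
      simp only [Option.map_some, hlt, hj0, Bool.and_false, Bool.or_false, Bool.and_true]
      unfold pvRepB
      rw [pv_getD_char s j hj, hg]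
      simp

-- ===== VERDICT (by name: the statement is the Claim_ definition above) =====
theorem replace_varies_spec : Claim_equal_replace_varies := by
  intro e v hdom hpre
  obtain ⟨hnd, hnc, hadj, hcr⟩ := hpre
  unfold Spec_replace_varies
  have hsafe : ¬(e.toList.length = 1 ∧ pvIsKey v (e.toList.getD 0 ' ') = true) := by
    rintro ⟨hl1, hk⟩
    apply hcr
    refine ⟨hl1, ?_⟩
    have hse : e.toList = [e.toList.getD 0 ' '] := by
      rcases hsl : e.toList with _ | ⟨a, l'⟩
      · rw [hsl] at hl1; simp at hl1
      · rw [hsl] at hl1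
        have hlen0 : l'.length = 0 := by simpa using hl1
        have hl'e : l' = [] := List.length_eq_zero_iff.mp hlen0
        subst hl'e
        rfl
    obtain ⟨p, hp, hpp⟩ := List.any_eq_true.mp hk
    rw [List.any_eq_true]
    refine ⟨p, hp, ?_⟩
    have hpc : p.1.toList = [e.toList.getD 0 ' '] := by simpa using hpp
    have : p.1.toList = e.toList := by rw [hpc, ← hse]
    simp [String.toList_inj.mp this]
  simp only [replace_varies, replace_varies_alt]
  rw [pv_init e.toList v]
  rw [pv_fold e.toList v hnd hnc hadj hsafe]
  rw [pv_final e.toList v hnd]
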